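-- pv_equiv track=rewrite | github.com/strange-loop-syndicate/plugins | plugins/deep-research/scripts/md_to_html.py | _close_sections
-- ===== SOURCE A (Python) =====
-- def _close_sections(html: str) -> str:
--     """Close all open section divs"""
--     lines = html.split('\n')
--     result = []
--     section_open = False
--
--     for i, line in enumerate(lines):
--         if '<div class="section">' in line:
--             if section_open:
--                 result.append('</div>')  # Close previous section
--             section_open = True
--         result.append(line)
--
--     # Close final section if still open
--     if section_open:
--         result.append('</div>')
--
--     return '\n'.join(result)
-- ===== SOURCE B (Python) =====
-- def _close_sections(html: str) -> str:
--     """Close all open section divs"""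
--     lines = html.split('\n')
--     for i, line in enumerate(lines):
--         if '<div class="section">' in line:
--             return '\n'.join(lines[:i] + _close_rec(lines[i:]))
--     return '\n'.join(lines)
--
--
-- def _close_rec(segment):
--     """segment[0] opens a section; close it before the next opener (recursing) or at the end."""
--     for j in range(1, len(segment)):
--         if '<div class="section">' in segment[j]:
--             return segment[:j] + ['</div>'] + _close_rec(segment[j:])
--     return segment + ['</div>']
-- ===== Notes on version B (the rewrite author's own statement) =====
-- stated objective: alternative
-- what changed: Replaces A's single flagged pass (a section_open boolean deciding when to emit '</div>') by a recursive divide-at-the-next-marker decomposition: pass the prefix before the first opener through, then recursively split the rest at each next opener line, closing each section at the split point or at the end.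
import Mathlib
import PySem

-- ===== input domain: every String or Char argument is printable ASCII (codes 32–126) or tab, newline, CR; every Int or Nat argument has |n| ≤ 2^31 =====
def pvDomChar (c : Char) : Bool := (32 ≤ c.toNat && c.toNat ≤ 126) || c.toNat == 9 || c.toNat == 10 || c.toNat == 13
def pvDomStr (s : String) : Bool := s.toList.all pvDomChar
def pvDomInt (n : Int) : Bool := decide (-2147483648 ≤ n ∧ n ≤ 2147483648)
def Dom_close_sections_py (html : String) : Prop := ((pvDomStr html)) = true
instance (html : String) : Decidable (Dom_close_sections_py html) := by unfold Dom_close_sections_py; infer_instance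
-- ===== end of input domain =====

-- B replaces A's stateful open-section flag loop by a recursive divide-at-the-next-marker
-- decomposition (pass prefix through, recurse on the remainder closing each section when the
-- next opener or the end is reached); objective: alternative, same cost; return values only.

def pvMarker : String := "<div class=\"section\">"

-- ===== PORT A =====
def close_sections_py (html : String) : String :=
  let lines := (PySem.Str.split? html "\n").getD []   -- html.split('\n'); sep ≠ "" so split? is some
  let st := lines.foldl (fun (st : List String × Bool) line =>
      if PySem.Str.isIn pvMarker line then
        ((if st.2 then st.1 ++ ["</div>"] else st.1) ++ [line], true)
      else (st.1 ++ [line], st.2)) ([], false)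
  PySem.Str.join "\n" (if st.2 then st.1 ++ ["</div>"] else st.1)

-- ===== PORT B =====
-- _close_rec: segment[0] opens a section; 'for j in range(1, len(segment))' searching the next
-- opener is the findIdx? on the tail (j = jr + 1), so segment[:j] = m :: rest.take jr and
-- segment[j:] = rest.drop jr.
def pvCloseRec : List String → List String
  | [] => ["</div>"]
  | m :: rest =>
    match rest.findIdx? (fun line => PySem.Str.isIn pvMarker line) with
    | some jr => (m :: rest.take jr) ++ ["</div>"] ++ pvCloseRec (rest.drop jr)
    | none => (m :: rest) ++ ["</div>"]
  termination_by l => l.length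
  decreasing_by simp [List.length_drop]

-- the enumerate loop with early return = findIdx? over the lines
def close_sections_py_alt (html : String) : String :=
  let lines := (PySem.Str.split? html "\n").getD []   -- html.split('\n')
  match lines.findIdx? (fun line => PySem.Str.isIn pvMarker line) with
  | some i => PySem.Str.join "\n"
      (PySem.List.slice lines none (some (i : Int)) ++ pvCloseRec (PySem.List.slice lines (some (i : Int))))
  | none => PySem.Str.join "\n" lines

-- ===== PRECONDITION & SPEC =====
def Spec_close_sections_py (html : String) (out : String) : Prop := out = close_sections_py_alt html
instance (html : String) (out : String) : Decidable (Spec_close_sections_py html out) := by unfold Spec_close_sections_py; infer_instance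

-- ===== CLAIM (what is proved, stated in full; the proofs are below) =====
def Claim_equal_close_sections_py : Prop := ∀ (html : String), Dom_close_sections_py html → Spec_close_sections_py html (close_sections_py html)

-- ===== LEMMAS AND PROOFS =====

-- A's loop once the flag is set: every later marker line is preceded by '</div>'.
theorem pvFoldTrue (ls : List String) (acc : List String) :
    ls.foldl (fun (st : List String × Bool) line =>
      if PySem.Str.isIn pvMarker line then
        ((if st.2 then st.1 ++ ["</div>"] else st.1) ++ [line], true)
      else (st.1 ++ [line], st.2)) (acc, true)
    = (acc ++ ls.flatMap (fun line => if PySem.Str.isIn pvMarker line then ["</div>", line] else [line]), true) := by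
  induction ls generalizing acc with
  | nil => simp only [List.foldl_nil, List.flatMap_nil, List.append_nil]
  | cons l ls ih =>
    simp only [List.foldl_cons, List.flatMap_cons]
    by_cases h : PySem.Str.isIn pvMarker l = true
    · simp only [h, if_true, ih, List.append_assoc, List.cons_append, List.nil_append]
    · simp only [h, if_false, Bool.false_eq_true, ih, List.append_assoc, List.singleton_append]

-- A's loop when no line matches: the lines pass through and the flag stays false.
theorem pvFoldFalseNone (ls : List String) (acc : List String)
    (h : ls.any (fun line => PySem.Str.isIn pvMarker line) = false) :
    ls.foldl (fun (st : List String × Bool) line =>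
      if PySem.Str.isIn pvMarker line then
        ((if st.2 then st.1 ++ ["</div>"] else st.1) ++ [line], true)
      else (st.1 ++ [line], st.2)) (acc, false)
    = (acc ++ ls, false) := by
  induction ls generalizing acc with
  | nil => simp only [List.foldl_nil, List.append_nil]
  | cons l ls ih =>
    simp only [List.any_cons, Bool.or_eq_false_iff] at h
    simp only [List.foldl_cons, h.1, if_false, Bool.false_eq_true, ih _ h.2,
      List.append_assoc, List.singleton_append]

-- A's loop from flag false when a marker exists: everything up to and including the first
-- marker line passes through, the rest is processed with the flag set.
theorem pvFoldFalse (ls : List String) (acc : List String)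
    (h : ls.any (fun line => PySem.Str.isIn pvMarker line) = true) :
    ls.foldl (fun (st : List String × Bool) line =>
      if PySem.Str.isIn pvMarker line then
        ((if st.2 then st.1 ++ ["</div>"] else st.1) ++ [line], true)
      else (st.1 ++ [line], st.2)) (acc, false)
    = (acc ++ ls.take (ls.findIdx (fun line => PySem.Str.isIn pvMarker line) + 1)
        ++ (ls.drop (ls.findIdx (fun line => PySem.Str.isIn pvMarker line) + 1)).flatMap
            (fun line => if PySem.Str.isIn pvMarker line then ["</div>", line] else [line]), true) := by
  induction ls generalizing acc with
  | nil => simp at h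
  | cons l ls ih =>
    by_cases hl : PySem.Str.isIn pvMarker l = true
    · simp only [List.foldl_cons, hl, if_true, Bool.false_eq_true, if_false,
        List.findIdx_cons, cond_true, List.take_succ_cons, List.take_zero, List.drop_succ_cons,
        List.drop_zero, pvFoldTrue, List.append_assoc, List.cons_append, List.nil_append]
    · simp only [List.any_cons, hl, Bool.false_or] at h
      simp only [List.foldl_cons, hl, if_false, Bool.false_eq_true, List.findIdx_cons, cond_false,
        ih _ h, List.take_succ_cons, List.drop_succ_cons, List.append_assoc,
        List.singleton_append]

-- flatMap of B's closer-inserter is the identity on marker-free lists.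
theorem pvFlatMapId (t : List String) (h : ∀ x ∈ t, PySem.Str.isIn pvMarker x = false) :
    t.flatMap (fun line => if PySem.Str.isIn pvMarker line then ["</div>", line] else [line]) = t := by
  induction t with
  | nil => rfl
  | cons l ls ih =>
    have := h l (by simp)
    simp only [List.flatMap_cons, this, if_false, Bool.false_eq_true, List.singleton_append,
      ih (fun x hx => h x (by simp [hx]))]

-- characterisation of B's recursion: it passes the head through, prepends '</div>' to each
-- later marker line, and closes at the end.
theorem pvCloseRecEq : ∀ (n : Nat) (m : String) (t : List String), t.length ≤ n →
    pvCloseRec (m :: t)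
    = m :: t.flatMap (fun line => if PySem.Str.isIn pvMarker line then ["</div>", line] else [line])
        ++ ["</div>"] := by
  intro n
  induction n with
  | zero =>
    intro m t ht
    have : t = [] := List.eq_nil_of_length_eq_zero (Nat.le_zero.mp ht)
    subst this
    rw [pvCloseRec.eq_def]
    rfl
  | succ n ih =>
    intro m t ht
    rcases hf : t.findIdx? (fun line => PySem.Str.isIn pvMarker line) with _ | jr
    · have hall := List.findIdx?_eq_none_iff.mp hf
      rw [pvCloseRec.eq_def]
      dsimp only
      rw [hf, pvFlatMapId t hall]
    · obtain ⟨hlt, hidx⟩ := List.findIdx?_eq_some_iff_findIdx_eq.mp hf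
      have hdrop : t.drop jr = t[jr] :: t.drop (jr + 1) := List.drop_eq_getElem_cons hlt
      have hrec : pvCloseRec (t.drop jr)
          = t[jr] :: (t.drop (jr + 1)).flatMap
              (fun line => if PySem.Str.isIn pvMarker line then ["</div>", line] else [line])
            ++ ["</div>"] := by
        rw [hdrop]
        exact ih _ _ (by simp only [List.length_drop]; omega)
      have hp : PySem.Str.isIn pvMarker t[jr] = true := by
        have hw : List.findIdx (fun line => PySem.Str.isIn pvMarker line) t < t.length := by
          rw [hidx]; exact hlt
        have := @List.findIdx_getElem _ (fun line => PySem.Str.isIn pvMarker line) t hw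
        simp only [hidx] at this
        exact this
      have htake : ∀ x ∈ t.take jr, PySem.Str.isIn pvMarker x = false := by
        intro x hx
        obtain ⟨k, hk, rfl⟩ := List.mem_take_iff_getElem.mp hx
        have hk' : k < jr := lt_of_lt_of_le hk (min_le_left _ _)
        exact List.not_of_lt_findIdx (by rw [hidx]; exact hk')
      have hsplit : t = t.take jr ++ t[jr] :: t.drop (jr + 1) := by
        conv_lhs => rw [← List.take_append_drop jr t]
        rw [hdrop]
      rw [pvCloseRec.eq_def]
      dsimp only
      rw [hf]
      dsimp only
      rw [hrec]
      conv_rhs => rw [hsplit]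
      simp only [List.flatMap_append, pvFlatMapId _ htake, List.flatMap_cons, hp, if_true,
        List.append_assoc, List.cons_append, List.nil_append]

-- ===== VERDICT (by name: the statement is the Claim_ definition above) =====
theorem close_sections_py_spec : Claim_equal_close_sections_py := by
  intro html _
  unfold Spec_close_sections_py close_sections_py close_sections_py_alt
  simp only []
  set ls := (PySem.Str.split? html "\n").getD [] with hls
  rcases hf : ls.findIdx? (fun line => PySem.Str.isIn pvMarker line) with _ | i
  · have hnone := List.findIdx?_eq_none_iff.mp hf
    have hany : ls.any (fun line => PySem.Str.isIn pvMarker line) = false :=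
      List.any_eq_false.mpr (fun x hx => by rw [Bool.not_eq_true]; exact hnone x hx)
    rw [pvFoldFalseNone ls [] hany]
    simp
  · obtain ⟨hlt, hidx⟩ := List.findIdx?_eq_some_iff_findIdx_eq.mp hf
    have hw : List.findIdx (fun line => PySem.Str.isIn pvMarker line) ls < ls.length := by
      rw [hidx]; exact hlt
    have hpi : PySem.Str.isIn pvMarker ls[i] = true := by
      have := @List.findIdx_getElem _ (fun line => PySem.Str.isIn pvMarker line) ls hw
      simp only [hidx] at this
      exact this
    have hany : ls.any (fun line => PySem.Str.isIn pvMarker line) = true := by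
      simp only [List.any_eq_true]
      exact ⟨ls[i], List.getElem_mem hlt, hpi⟩
    rw [pvFoldFalse ls [] hany, if_pos rfl, List.nil_append, hidx]
    dsimp only
    rw [PySem.List.slice_from ls (Int.natCast_nonneg _),
      PySem.List.slice_to ls (Int.natCast_nonneg _), Int.toNat_natCast]
    have hdrop : ls.drop i = ls[i] :: ls.drop (i + 1) := List.drop_eq_getElem_cons hlt
    have hrec := pvCloseRecEq (ls.drop (i + 1)).length ls[i] (ls.drop (i + 1)) (le_refl _)
    rw [hdrop, hrec]
    have htake : ls.take (i + 1) = ls.take i ++ [ls[i]] := by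
      rw [List.take_add_one]
      simp [List.getElem?_eq_getElem hlt]
    congr 1
    rw [htake]
    simp only [List.append_assoc, List.cons_append, List.nil_append]
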